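-- pv_equiv track=rewrite | github.com/hwu1001/LeetCode | Python3/String/backspaceStringCompare.py | editorProcessor
-- ===== SOURCE A (Python) =====
-- import collections
--
-- def editorProcessor(string: str) -> str:
--     res = collections.deque()
--     l = 0
--     for i in string:
--         if i == "#":
--             if  l > 0:
--                 res.pop()
--                 l -= 1
--         else:
--             res.append(i)
--             l += 1
--     return ''.join(list(res))
-- ===== SOURCE B (Python) =====
-- def editorProcessor(string: str) -> str:
--     skip = 0
--     out = []
--     for ch in reversed(string):
--         if ch == '#':
--             skip += 1
--         elif skip > 0:
--             skip -= 1
--         else: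
--             out.append(ch)
--     out.reverse()
--     return ''.join(out)
-- ===== Notes on version B (the rewrite author's own statement) =====
-- stated objective: alternative
-- what changed: Replaces the forward deque-stack with pop() by a right-to-left scan keeping only an integer skip counter and emitting surviving characters.
import Mathlib
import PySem

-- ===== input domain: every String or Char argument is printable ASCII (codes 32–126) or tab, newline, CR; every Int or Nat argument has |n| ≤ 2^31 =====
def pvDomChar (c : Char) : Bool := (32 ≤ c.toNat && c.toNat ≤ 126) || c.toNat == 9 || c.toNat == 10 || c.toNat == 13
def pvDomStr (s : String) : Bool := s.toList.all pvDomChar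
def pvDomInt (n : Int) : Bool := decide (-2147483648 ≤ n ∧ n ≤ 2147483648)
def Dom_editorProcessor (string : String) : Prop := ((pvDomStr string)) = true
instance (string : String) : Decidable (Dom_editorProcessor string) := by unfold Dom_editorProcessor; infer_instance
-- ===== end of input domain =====

-- B replaces A's forward deque-with-pop by a right-to-left scan with a skip counter (alternative decomposition, same cost).

-- ===== PORT A =====
-- A keeps a deque `res` and its length `l`; '#' pops (when l > 0), otherwise append.
def editorProcessor (string : String) : String :=
  let st := string.toList.foldl
    (fun (st : List Char × Int) i =>
      if i = '#' then
        (if st.2 > 0 then (st.1.dropLast, st.2 - 1) else st)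
      else (st.1 ++ [i], st.2 + 1))
    ([], 0)
  String.ofList st.1

-- ===== PORT B =====
-- B scans the reversed string; `skip` counts pending backspaces, survivors are
-- collected in traversal order and reversed at the end (out.append ↦ cons + final reverse).
def editorProcessorAltGo : List Char → Nat → List Char
  | [], _ => []
  | ch :: rest, skip =>
      if ch = '#' then editorProcessorAltGo rest (skip + 1)
      else if skip > 0 then editorProcessorAltGo rest (skip - 1)
      else ch :: editorProcessorAltGo rest skip

def editorProcessor_alt (string : String) : String :=
  String.ofList ((editorProcessorAltGo string.toList.reverse 0).reverse)

-- ===== PRECONDITION & SPEC =====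
def Spec_editorProcessor (string : String) (out : String) : Prop := out = editorProcessor_alt string
instance (string : String) (out : String) : Decidable (Spec_editorProcessor string out) := by unfold Spec_editorProcessor; infer_instance

-- ===== CLAIM (what is proved, stated in full; the proofs are below) =====
def Claim_equal_editorProcessor : Prop := ∀ (string : String), Dom_editorProcessor string → Spec_editorProcessor string (editorProcessor string)

-- ===== LEMMAS AND PROOFS =====

-- reference forward stack (just the list, no length counter)
def pvStack (l : List Char) (acc : List Char) : List Char :=
  l.foldl (fun res i => if i = '#' then res.dropLast else res ++ [i]) acc

theorem pvStack_append (xs ys : List Char) (acc : List Char) :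
    pvStack (xs ++ ys) acc = pvStack ys (pvStack xs acc) := by
  simp [pvStack, List.foldl_append]

-- A's foldl state is (pvStack, its length)
theorem pvA_state (l : List Char) (res : List Char) :
    l.foldl
      (fun (st : List Char × Int) i =>
        if i = '#' then
          (if st.2 > 0 then (st.1.dropLast, st.2 - 1) else st)
        else (st.1 ++ [i], st.2 + 1))
      (res, (res.length : Int))
    = (pvStack l res, ((pvStack l res).length : Int)) := by
  induction l generalizing res with
  | nil => simp [pvStack]
  | cons c rest ih =>
    by_cases hc : c = '#'
    · subst hc
      cases res with
      | nil =>
        simp only [List.foldl_cons, pvStack]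
        simpa [pvStack] using ih []
      | cons a as =>
        have hpos : (0 : Int) < ((a :: as).length : Int) := by
          simp
        simp only [List.foldl_cons, if_pos hpos]
        simpa [pvStack, List.length_dropLast] using ih ((a :: as).dropLast)
    · simp only [List.foldl_cons, if_neg hc]
      simpa [pvStack, hc] using ih (res ++ [c])

-- B with pending skip equals the forward stack of the reversed input followed by `skip` extra '#'
theorem pvStack_replicate (k : Nat) :
    pvStack (List.replicate k '#') [] = [] := by
  induction k with
  | zero => simp [pvStack]
  | succ n ih => simpa [List.replicate_succ, pvStack] using ih

theorem pvB_stack (r : List Char) (skip : Nat) :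
    (editorProcessorAltGo r skip).reverse
      = pvStack (r.reverse ++ List.replicate skip '#') [] := by
  induction r generalizing skip with
  | nil =>
    simp only [editorProcessorAltGo, List.reverse_nil, List.nil_append]
    exact (pvStack_replicate skip).symm
  | cons c rest ih =>
    by_cases hc : c = '#'
    · subst hc
      rw [editorProcessorAltGo, if_pos rfl, ih (skip + 1)]
      congr 1
      simp [List.replicate_succ]
    · by_cases hs : skip > 0
      · rw [editorProcessorAltGo, if_neg hc, if_pos hs, ih (skip - 1)]
        obtain ⟨k, rfl⟩ : ∃ k, skip = k + 1 := ⟨skip - 1, by omega⟩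
        simp only [Nat.add_sub_cancel, List.reverse_cons]
        rw [List.replicate_succ, pvStack_append, pvStack_append,
          show ('#' :: List.replicate k '#') = ['#'] ++ List.replicate k '#' from rfl,
          pvStack_append]
        congr 1
        simp [pvStack, hc]
      · have hs0 : skip = 0 := by omega
        subst hs0
        rw [editorProcessorAltGo, if_neg hc, if_neg hs]
        simp only [List.reverse_cons, List.replicate_zero, List.append_nil] at *
        rw [pvStack_append]
        simp [pvStack, hc, ih 0]

-- ===== VERDICT (by name: the statement is the Claim_ definition above) =====
theorem editorProcessor_spec : Claim_equal_editorProcessor := by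
  intro s _
  unfold Spec_editorProcessor editorProcessor editorProcessor_alt
  rw [pvB_stack]
  have := pvA_state s.toList []
  simp only [List.length_nil, Int.ofNat_zero] at this
  simp [this, pvStack]
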